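-- pv_equiv track=rewrite | github.com/haowei614/ArgRE-code | src/openre_bench/argumentation/af_solver.py | _is_admissible
-- ===== SOURCE A (Python) =====
-- def _is_admissible(extension: set[str], attack_pairs: set[tuple[str, str]]) -> bool:
--     if not _is_conflict_free(extension, attack_pairs):
--         return False
--     for argument_id in extension:
--         attackers = _attackers_of(argument_id, attack_pairs)
--         if not all(_is_attacked_by_some(attacker, extension, attack_pairs) for attacker in attackers):
--             return False
--     return True
--
-- def _is_conflict_free(extension: set[str], attack_pairs: set[tuple[str, str]]) -> bool:
--     for attacker, target in attack_pairs:
--         if attacker in extension and target in extension: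
--             return False
--     return True
--
-- def _attackers_of(target: str, attack_pairs: set[tuple[str, str]]) -> set[str]:
--     return {attacker for attacker, attacked in attack_pairs if attacked == target}
--
-- def _is_attacked_by_some(
--     target: str,
--     attackers: set[str],
--     attack_pairs: set[tuple[str, str]],
-- ) -> bool:
--     return any((attacker, target) in attack_pairs for attacker in attackers)
-- ===== SOURCE B (Python) =====
-- def _is_admissible(extension: set[str], attack_pairs: set[tuple[str, str]]) -> bool:
--     attacked_by_ext = {target for source, target in attack_pairs if source in extension}
--     if extension & attacked_by_ext:
--         return False
--     return all(source in attacked_by_ext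
--                for source, target in attack_pairs if target in extension)
-- ===== Notes on version B (the rewrite author's own statement) =====
-- stated objective: faster
-- what changed: B precomputes in one pass the set of arguments the extension attacks, then checks conflict-freeness as set disjointness and defense by a single all() over attack_pairs, removing A's per-extension-member attacker computation and the nested all/any scans.
import Mathlib
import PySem

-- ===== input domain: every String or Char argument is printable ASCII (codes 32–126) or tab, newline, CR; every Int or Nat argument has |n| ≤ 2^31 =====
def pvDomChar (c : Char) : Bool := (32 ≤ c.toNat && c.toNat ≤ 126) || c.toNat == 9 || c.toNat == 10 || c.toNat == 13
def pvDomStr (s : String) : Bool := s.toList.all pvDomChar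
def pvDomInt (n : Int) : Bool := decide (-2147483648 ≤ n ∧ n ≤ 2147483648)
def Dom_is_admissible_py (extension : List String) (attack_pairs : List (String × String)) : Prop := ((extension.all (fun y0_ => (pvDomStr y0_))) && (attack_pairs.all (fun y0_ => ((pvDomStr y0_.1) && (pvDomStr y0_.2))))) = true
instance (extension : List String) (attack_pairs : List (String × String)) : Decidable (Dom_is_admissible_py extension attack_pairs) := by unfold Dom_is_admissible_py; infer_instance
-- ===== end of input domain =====

-- B replaces A's per-argument attacker scan and nested all/any with one precomputed
-- set of arguments the extension attacks, checked by disjointness and a single pass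
-- over attack_pairs (objective: faster, measured).


-- ===== PORT A =====
-- A-side helpers: literal ports of _is_conflict_free, _attackers_of, _is_attacked_by_some
def pvConflictFree (extension : List String) (attack_pairs : List (String × String)) : Bool :=
  attack_pairs.all (fun p => !(extension.contains p.1 && extension.contains p.2))

def pvAttackersOf (target : String) (attack_pairs : List (String × String)) : PySem.Set String :=
  PySem.Set.ofList ((attack_pairs.filter (fun p => p.2 == target)).map Prod.fst)

def pvIsAttackedBySome (target : String) (attackers : List String) (attack_pairs : List (String × String)) : Bool :=
  attackers.any (fun a => attack_pairs.contains (a, target))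

def is_admissible_py (extension : List String) (attack_pairs : List (String × String)) : Bool :=
  if !(pvConflictFree extension attack_pairs) then false
  else
    extension.all (fun argument_id =>
      (pvAttackersOf argument_id attack_pairs).all
        (fun attacker => pvIsAttackedBySome attacker extension attack_pairs))

-- ===== PORT B =====
-- B: one pass computes the set attacked by the extension; then disjointness + one all over attack_pairs
def is_admissible_py_alt (extension : List String) (attack_pairs : List (String × String)) : Bool :=
  let attacked := PySem.Set.ofList
    ((attack_pairs.filter (fun p => extension.contains p.1)).map Prod.snd)
  if extension.any (fun x => attacked.contains x) then false
  else attack_pairs.all (fun p => !(extension.contains p.2) || attacked.contains p.1)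

-- ===== PRECONDITION & SPEC =====
def Spec_is_admissible_py (extension : List String) (attack_pairs : List (String × String)) (out : Bool) : Prop := out = is_admissible_py_alt extension attack_pairs
instance (extension : List String) (attack_pairs : List (String × String)) (out : Bool) : Decidable (Spec_is_admissible_py extension attack_pairs out) := by unfold Spec_is_admissible_py; infer_instance

-- ===== CLAIM (what is proved, stated in full; the proofs are below) =====
def Claim_equal_is_admissible_py : Prop := ∀ (extension : List String) (attack_pairs : List (String × String)), Dom_is_admissible_py extension attack_pairs → Spec_is_admissible_py extension attack_pairs (is_admissible_py extension attack_pairs)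

-- ===== LEMMAS AND PROOFS =====

-- ===== VERDICT (by name: the statement is the Claim_ definition above) =====
theorem is_admissible_py_spec : Claim_equal_is_admissible_py := by
  intro extension attack_pairs _
  unfold Spec_is_admissible_py is_admissible_py is_admissible_py_alt pvConflictFree pvAttackersOf pvIsAttackedBySome
  rw [Bool.eq_iff_iff]
  simp [List.all_eq_true, List.any_eq_true, PySem.Set.contains,
    PySem.Set.mem_ofList, List.mem_map, List.mem_filter]
  constructor
  · rintro ⟨hcf, hdef⟩
    exact ⟨fun x hx s hs => (hcf s x hs).resolve_right (fun h => h hx),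
      fun s t hst => by
        by_cases ht : t ∈ extension
        · exact Or.inr (by
            obtain ⟨e, he, hep⟩ := hdef t ht s hst
            exact ⟨e, hep, he⟩)
        · exact Or.inl ht⟩
  · rintro ⟨hcf, hdef⟩
    refine ⟨fun s t hst => ?_, fun t ht s hst => ?_⟩
    · by_cases hs : s ∈ extension
      · exact Or.inr (fun htE => hcf t htE s hst hs)
      · exact Or.inl hs
    · obtain ⟨e, hep, he⟩ := (hdef s t hst).resolve_left (fun h => h ht)
      exact ⟨e, he, hep⟩
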